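-- pv_equiv track=rewrite | github.com/HarshTambade/AI-CRM | backend/app/ai/sentiment_analysis.py | _count_sentiment_changes
-- ===== SOURCE A (Python) =====
-- from typing import Dict, List, Optional, Tuple
--
-- def _count_sentiment_changes(sentiments: List[str]) -> int:
--     """Count the number of sentiment changes in a conversation."""
--     if len(sentiments) < 2:
--         return 0
--
--     changes = 0
--     for i in range(1, len(sentiments)):
--         if sentiments[i] != sentiments[i-1]:
--             changes += 1
--
--     return changes
-- ===== SOURCE B (Python) =====
-- def _count_sentiment_changes(sentiments):
--     """Count sentiment changes by enumerating maximal runs of equal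
--     consecutive labels: the answer is (number of runs) - 1."""
--     runs = 0
--     idx = 0
--     n = len(sentiments)
--     while idx < n:
--         runs += 1
--         cur = sentiments[idx]
--         idx += 1
--         while idx < n and sentiments[idx] == cur:
--             idx += 1
--     return runs - 1 if runs else 0
-- ===== Notes on version B (the rewrite author's own statement) =====
-- stated objective: alternative
-- what changed: B reframes the problem as counting maximal runs of equal consecutive labels (outer loop per run, inner skip loop) and returns runs-1, instead of A's single indexed scan comparing each element to its predecessor.
import Mathlib
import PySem

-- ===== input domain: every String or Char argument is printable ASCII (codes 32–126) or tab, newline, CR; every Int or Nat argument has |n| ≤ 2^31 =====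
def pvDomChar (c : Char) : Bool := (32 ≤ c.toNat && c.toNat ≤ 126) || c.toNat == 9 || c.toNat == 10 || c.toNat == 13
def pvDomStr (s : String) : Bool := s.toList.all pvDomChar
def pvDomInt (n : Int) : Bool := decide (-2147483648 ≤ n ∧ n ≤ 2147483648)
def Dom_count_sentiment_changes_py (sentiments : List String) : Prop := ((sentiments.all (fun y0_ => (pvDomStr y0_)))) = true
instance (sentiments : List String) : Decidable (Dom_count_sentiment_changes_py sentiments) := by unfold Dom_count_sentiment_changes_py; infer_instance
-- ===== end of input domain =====

-- B counts maximal runs of equal consecutive labels and returns runs-1, instead of A's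
-- indexed scan comparing each element with its predecessor (objective: alternative).

-- ===== PORT A =====
-- for i in range(1, len(sentiments)): if sentiments[i] != sentiments[i-1]: changes += 1
def count_sentiment_changes_py (sentiments : List String) : Int :=
  if sentiments.length < 2 then 0
  else
    (PySem.List.pyRange 1 (sentiments.length : Int) 1).foldl
      (fun changes i =>
        if PySem.List.pyGetD sentiments i "" ≠ PySem.List.pyGetD sentiments (i - 1) "" then
          changes + 1
        else changes) 0

-- ===== PORT B =====
-- the outer while loop of Source B: each step consumes one maximal run
-- (the inner 'while … == cur: idx += 1' skip loop is the dropWhile)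
def pvRunsB : List String → Nat
  | [] => 0
  | x :: rest => 1 + pvRunsB (rest.dropWhile (· == x))
termination_by s => s.length
decreasing_by
  exact Nat.lt_succ_of_le (List.length_dropWhile_le _ _)

def count_sentiment_changes_py_alt (sentiments : List String) : Int :=
  let runs := pvRunsB sentiments
  if runs = 0 then 0 else (runs : Int) - 1

-- ===== PRECONDITION & SPEC =====
def Spec_count_sentiment_changes_py (sentiments : List String) (out : Int) : Prop := out = count_sentiment_changes_py_alt sentiments
instance (sentiments : List String) (out : Int) : Decidable (Spec_count_sentiment_changes_py sentiments out) := by unfold Spec_count_sentiment_changes_py; infer_instance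

-- ===== CLAIM (what is proved, stated in full; the proofs are below) =====
def Claim_equal_count_sentiment_changes_py : Prop := ∀ (sentiments : List String), Dom_count_sentiment_changes_py sentiments → Spec_count_sentiment_changes_py sentiments (count_sentiment_changes_py sentiments)

-- ===== LEMMAS AND PROOFS =====

-- the number of adjacent unequal pairs, by structural recursion (proof-side characterisation)
def pvPairChanges : List String → Int
  | a :: b :: t => (if b ≠ a then 1 else 0) + pvPairChanges (b :: t)
  | _ => 0

lemma pvFoldA (a : String) (t : List String) (acc : Int) :
    (List.range t.length).foldl
      (fun c k => if (a :: t).getD (k + 1) "" ≠ (a :: t).getD k "" then c + 1 else c) acc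
      = acc + pvPairChanges (a :: t) := by
  induction t generalizing a acc with
  | nil => simp [pvPairChanges]
  | cons b t ih =>
    simp only [List.length_cons]
    rw [List.range_succ_eq_map]
    simp only [List.foldl_cons, List.foldl_map]
    have := ih b (if (a :: b :: t).getD 1 "" ≠ (a :: b :: t).getD 0 "" then acc + 1 else acc)
    simp only [List.getD_cons_succ, List.getD_cons_zero] at this ⊢
    rw [this, pvPairChanges]
    split_ifs <;> ring

lemma pvPairRuns : ∀ (s : List String), s ≠ [] → pvPairChanges s = (pvRunsB s : Int) - 1 := by
  intro s hs
  induction s with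
  | nil => exact absurd rfl hs
  | cons x rest ih =>
    cases rest with
    | nil => simp [pvPairChanges, pvRunsB]
    | cons y t =>
      rw [pvRunsB, List.dropWhile_cons]
      by_cases hxy : y = x
      · subst hxy
        simp only [BEq.rfl, if_true]
        have h1 : pvPairChanges (y :: y :: t) = pvPairChanges (y :: t) := by
          simp [pvPairChanges]
        have h2 : pvRunsB (y :: t) = 1 + pvRunsB (t.dropWhile (· == y)) := by
          rw [pvRunsB]
        rw [h1, ih (by simp), h2]
      · have hbeq : (y == x) = false := by simp [hxy]
        rw [hbeq]
        simp only [Bool.false_eq_true, if_false]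
        have h1 : pvPairChanges (x :: y :: t) = 1 + pvPairChanges (y :: t) := by
          simp [pvPairChanges, hxy]
        rw [h1, ih (by simp), pvRunsB]
        push_cast
        ring

-- ===== VERDICT (by name: the statement is the Claim_ definition above) =====
theorem count_sentiment_changes_py_spec : Claim_equal_count_sentiment_changes_py := by
  intro s _
  unfold Spec_count_sentiment_changes_py count_sentiment_changes_py count_sentiment_changes_py_alt
  match s with
  | [] => simp [pvRunsB]
  | [a] => simp [pvRunsB]
  | a :: b :: t =>
    have hlen : ¬ ((a :: b :: t).length < 2) := by simp
    rw [if_neg hlen]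
    have hrange : PySem.List.pyRange 1 ((a :: b :: t).length : Int) 1
        = (List.range (b :: t).length).map (fun k : Nat => (1 : Int) + (k : Int)) := by
      rw [PySem.List.pyRange_one]
      congr 1
      simp
    rw [hrange, List.foldl_map]
    have hidx : ∀ (c : Int) (k : Nat),
        (if PySem.List.pyGetD (a :: b :: t) ((1 : Int) + k) ""
              ≠ PySem.List.pyGetD (a :: b :: t) ((1 : Int) + k - 1) "" then c + 1 else c)
          = (if (a :: b :: t).getD (k + 1) "" ≠ (a :: b :: t).getD k "" then c + 1 else c) := by
      intro c k
      have e1 : (1 : Int) + k = ((k + 1 : Nat) : Int) := by omega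
      have e2 : (1 : Int) + k - 1 = ((k : Nat) : Int) := by omega
      rw [e2, e1, PySem.List.pyGetD_natCast, PySem.List.pyGetD_natCast]
    simp only [hidx]
    rw [pvFoldA a (b :: t) 0, pvPairRuns (a :: b :: t) (by simp)]
    have : pvRunsB (a :: b :: t) ≠ 0 := by rw [pvRunsB]; omega
    simp [this]
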